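-- pv_equiv track=rewrite | github.com/XuanShine/PyMusic | proba_music.py | minus_dict_positive
-- ===== SOURCE A (Python) =====
-- from copy import deepcopy
--
-- def minus_dict_positive(dico1, dico2):
--     dico1 = deepcopy(dico1)
--     for key in dico2:
--         if key in dico1:
--             if dico1[key] <= dico2[key]:
--                 dico1.pop(key)
--             else:
--                 dico1[key] -= dico2[key]
--     return dico1
-- ===== SOURCE B (Python) =====
-- from copy import deepcopy
--
-- def minus_dict_positive(dico1, dico2):
--     # Build the result positively by iterating over dico1 instead of
--     # copying dico1 and mutating it while iterating over dico2.
--     result = {}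
--     for key, v in dico1.items():
--         if key not in dico2:
--             result[key] = deepcopy(v)
--         elif v > dico2[key]:
--             result[key] = v - dico2[key]
--     return result
-- ===== Notes on version B (the rewrite author's own statement) =====
-- stated objective: simpler
-- what changed: B builds a fresh dict in one comprehension-style pass over dico1 (keep, subtract, or drop each entry based on a dico2 lookup) instead of deepcopy-then-mutate driven by a loop over dico2 with pop/decrement.
import Mathlib
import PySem

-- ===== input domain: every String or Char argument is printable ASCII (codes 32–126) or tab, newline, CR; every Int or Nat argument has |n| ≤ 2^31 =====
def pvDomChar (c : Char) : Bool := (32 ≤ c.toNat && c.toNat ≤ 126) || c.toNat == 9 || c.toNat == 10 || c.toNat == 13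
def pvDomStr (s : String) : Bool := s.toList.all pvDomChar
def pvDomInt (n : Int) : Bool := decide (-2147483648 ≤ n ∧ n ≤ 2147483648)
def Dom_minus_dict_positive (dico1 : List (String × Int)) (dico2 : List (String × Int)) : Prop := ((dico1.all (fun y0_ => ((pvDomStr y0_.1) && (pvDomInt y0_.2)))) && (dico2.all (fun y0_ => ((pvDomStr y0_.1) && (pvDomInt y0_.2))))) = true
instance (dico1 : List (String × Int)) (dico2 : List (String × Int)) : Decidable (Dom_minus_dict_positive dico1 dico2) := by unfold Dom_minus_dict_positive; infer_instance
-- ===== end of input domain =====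

-- B replaces A's deepcopy-then-mutate loop over dico2 by a single positive pass over
-- dico1 that builds a fresh dict; equivalence of the RETURN value is proved (A does not
-- mutate its arguments).

-- ===== PORT A =====
-- one iteration of A's 'for key in dico2' loop body, acting on the working copy of dico1
def pvAStep (d : PySem.Dict String Int) (kv : String × Int) : PySem.Dict String Int :=
  if d.contains kv.1 then
    if d.getD kv.1 0 ≤ kv.2 then d.erase kv.1
    else d.insert kv.1 (d.getD kv.1 0 - kv.2)
  else d

def minus_dict_positive (dico1 : List (String × Int)) (dico2 : List (String × Int)) : List (String × Int) :=
  (dico2.foldl pvAStep (PySem.Dict.mk dico1)).items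

-- ===== PORT B =====
-- B's per-entry decision: keep, subtract, or drop the dico1 entry, from a dico2 lookup
def pvBSel (dico2 : List (String × Int)) (kv : String × Int) : Option (String × Int) :=
  match (PySem.Dict.mk dico2).get? kv.1 with
  | none => some kv
  | some w => if w < kv.2 then some (kv.1, kv.2 - w) else none

def minus_dict_positive_alt (dico1 : List (String × Int)) (dico2 : List (String × Int)) : List (String × Int) :=
  dico1.filterMap (pvBSel dico2)

-- ===== PRECONDITION & SPEC =====
-- Pre_ excludes association lists with duplicate keys: they do not encode any Python
-- dict (the parameters' type), so neither Python ever receives them.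
def Pre_minus_dict_positive (dico1 : List (String × Int)) (dico2 : List (String × Int)) : Prop :=
  (dico1.map Prod.fst).Nodup ∧ (dico2.map Prod.fst).Nodup
instance (dico1 : List (String × Int)) (dico2 : List (String × Int)) : Decidable (Pre_minus_dict_positive dico1 dico2) := by unfold Pre_minus_dict_positive; infer_instance

def pvWitness_minus_dict_positive : (List (String × Int)) × (List (String × Int)) :=
  ([("a", 3), ("b", 1)], [("a", 2), ("c", 5)])

def Spec_minus_dict_positive (dico1 : List (String × Int)) (dico2 : List (String × Int)) (out : List (String × Int)) : Prop := out = minus_dict_positive_alt dico1 dico2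
instance (dico1 : List (String × Int)) (dico2 : List (String × Int)) (out : List (String × Int)) : Decidable (Spec_minus_dict_positive dico1 dico2 out) := by unfold Spec_minus_dict_positive; infer_instance

-- ===== CLAIM (what is proved, stated in full; the proofs are below) =====
def Claim_equal_minus_dict_positive : Prop := ∀ (dico1 : List (String × Int)) (dico2 : List (String × Int)), Dom_minus_dict_positive dico1 dico2 → Pre_minus_dict_positive dico1 dico2 → Spec_minus_dict_positive dico1 dico2 (minus_dict_positive dico1 dico2)

-- ===== LEMMAS AND PROOFS =====

lemma pvAStep_nodup (d : PySem.Dict String Int) (kv : String × Int)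
    (hd : (d.items.map Prod.fst).Nodup) : ((pvAStep d kv).items.map Prod.fst).Nodup := by
  unfold pvAStep
  split_ifs with h1 h2
  · exact hd.sublist (List.filter_sublist.map _)
  · simp only [PySem.Dict.insert, h1, if_pos, List.map_map]
    have : (Prod.fst ∘ fun p : String × Int => if p.1 == kv.1 then (kv.1, d.getD kv.1 0 - kv.2) else p) = Prod.fst := by
      funext p
      by_cases h : p.1 = kv.1
      · simp [h]
      · simp [h]
    rw [this]; exact hd
  · exact hd

lemma pv_main (d2 : List (String × Int)) (d : PySem.Dict String Int)
    (hd : (d.items.map Prod.fst).Nodup) (h2 : (d2.map Prod.fst).Nodup) :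
    (d2.foldl pvAStep d).items = d.items.filterMap (pvBSel d2) := by
  induction d2 generalizing d with
  | nil =>
    simp [pvBSel, PySem.Dict.get?]
  | cons kw rest ih =>
    obtain ⟨k, w⟩ := kw
    simp only [List.map_cons, List.nodup_cons] at h2
    obtain ⟨hk, hrest⟩ := h2
    rw [List.foldl_cons, ih _ (pvAStep_nodup d (k, w) hd) hrest]
    have hsel : ∀ kv : String × Int, pvBSel ((k, w) :: rest) kv =
        if kv.1 = k then (if w < kv.2 then some (k, kv.2 - w) else none) else pvBSel rest kv := by
      intro kv
      simp only [pvBSel, PySem.Dict.get?_mk_cons]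
      by_cases h : kv.1 = k
      · simp [h]
      · simp [beq_iff_eq, Ne.symm h, h]
    have hgetD : ∀ kv : String × Int, kv ∈ d.items → kv.1 = k → d.getD k 0 = kv.2 := by
      intro kv hm h
      have : d.getD kv.1 0 = kv.2 := PySem.Dict.getD_of_mem_items d (by simpa using hm)
        (by simpa [PySem.Dict.keys] using hd) 0
      rw [← h]; exact this
    unfold pvAStep
    split_ifs with h1 hle
    · -- erase branch: dico1 has an entry at k with value ≤ w; both sides drop it
      simp only [PySem.Dict.erase, List.filterMap_filter]
      refine List.filterMap_congr (fun kv hm => ?_)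
      rw [hsel kv]
      by_cases h : kv.1 = k
      · have hw : ¬ w < kv.2 := not_lt.mpr (hgetD kv hm h ▸ hle)
        simp [h, hw]
      · simp [h]
    · -- insert branch: dico1 has an entry at k with value > w; both sides subtract
      simp only [PySem.Dict.insert, h1, if_pos, List.filterMap_map]
      refine List.filterMap_congr (fun kv hm => ?_)
      rw [hsel kv]
      by_cases h : kv.1 = k
      · have hv : d.getD k 0 = kv.2 := hgetD kv hm h
        have hknr : (PySem.Dict.mk rest).get? k = none := by
          rw [PySem.Dict.get?_eq_none_iff_not_mem_keys]
          simpa [PySem.Dict.keys] using hk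
        have hlt : w < kv.2 := by
          rw [← hv]; simpa using not_le.mp hle
        simp [Function.comp, h, pvBSel, hknr, hlt, hv]
      · simp [Function.comp, h, beq_iff_eq]
    · -- key absent from dico1: both sides leave every entry alone
      refine (List.filterMap_congr (fun kv hm => ?_)).symm
      rw [hsel kv]
      have hne : kv.1 ≠ k := by
        intro he
        exact absurd (show d.contains (k, w).1 = true by
          simp only [PySem.Dict.contains, List.any_eq_true]
          exact ⟨kv, hm, by simp [he]⟩) h1
      simp [hne]

-- ===== VERDICT (by name: the statement is the Claim_ definition above) =====
theorem minus_dict_positive_spec : Claim_equal_minus_dict_positive := by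
  intro d1 d2 _ hpre
  unfold Spec_minus_dict_positive minus_dict_positive minus_dict_positive_alt
  exact pv_main d2 (PySem.Dict.mk d1) hpre.1 hpre.2
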